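-- pv_equiv track=rewrite | github.com/tejava7177/New_LSTM | LSTM/chord_engine/smart_progression.py | pick_anchor
-- ===== SOURCE A (Python) =====
-- from typing import List, Dict, Tuple, Optional, Callable
--
-- def pick_anchor(seed_degs: List[int]) -> int:
--     candidates = []
--     for i,d in enumerate(seed_degs):
--         if d in (1,5): candidates.append((0 if d==1 else 1, i))
--     if candidates:
--         candidates.sort()
--         return candidates[0][1]
--     for i,d in enumerate(seed_degs):
--         if d!=-1: return i
--     return 0
-- ===== SOURCE B (Python) =====
-- def pick_anchor(seed_degs):
--     first_five = -1
--     first_other = -1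
--     for i, d in enumerate(seed_degs):
--         if d == 1:
--             return i
--         if d == 5 and first_five < 0:
--             first_five = i
--         if d != -1 and first_other < 0:
--             first_other = i
--     if first_five >= 0:
--         return first_five
--     if first_other >= 0:
--         return first_other
--     return 0
-- ===== Notes on version B (the rewrite author's own statement) =====
-- stated objective: simpler
-- what changed: Replaced A's build-candidate-list-then-sort-then-index scheme with a single left-to-right pass that returns immediately on the first degree-1 and otherwise remembers the first degree-5 and first non-(-1) indices, removing the list and the sort entirely.
import Mathlib
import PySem

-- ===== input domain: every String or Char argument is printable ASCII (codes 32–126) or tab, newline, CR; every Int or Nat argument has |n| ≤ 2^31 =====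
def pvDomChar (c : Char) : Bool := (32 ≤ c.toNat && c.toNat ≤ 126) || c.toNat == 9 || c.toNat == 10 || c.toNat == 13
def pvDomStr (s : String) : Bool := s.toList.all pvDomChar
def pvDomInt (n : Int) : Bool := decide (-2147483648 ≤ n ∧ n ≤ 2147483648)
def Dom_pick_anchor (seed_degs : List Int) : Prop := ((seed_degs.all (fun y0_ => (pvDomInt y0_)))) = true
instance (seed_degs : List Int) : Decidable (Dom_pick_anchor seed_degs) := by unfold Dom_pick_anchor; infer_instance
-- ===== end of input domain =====

-- B replaces A's candidate-list-then-sort with a single left-to-right pass keeping the first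
-- degree-5 and first non-(-1) indices (objective: simpler; same exact return value).


-- ===== PORT A =====
-- the second 'for i,d in enumerate(...)' loop of A, with its early return and final 'return 0'
def pickAFallback : List (Int × Int) → Int
  | [] => 0
  | (i, d) :: rest => if d ≠ -1 then i else pickAFallback rest

def pick_anchor (seed_degs : List Int) : Int :=
  let candidates := (PySem.List.enumerate seed_degs).foldl
    (fun acc p => if p.2 = 1 ∨ p.2 = 5 then acc ++ [((if p.2 = 1 then (0 : Int) else 1), p.1)] else acc) []
  if candidates = [] then
    pickAFallback (PySem.List.enumerate seed_degs)
  else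
    -- candidates.sort() on int pairs = stable sort by the tuple key; candidates[0][1]
    match PySem.List.sorted2 candidates (·.1) (·.2) with
    | c :: _ => c.2
    | [] => 0  -- unreachable: candidates ≠ []

-- ===== PORT B =====
-- B's single loop: i is the running index, ff/fo the first-degree-5 / first-non-(-1) indices (-1 = unset)
def pickBLoop : List Int → Int → Int → Int → Int
  | [], _, ff, fo => if 0 ≤ ff then ff else if 0 ≤ fo then fo else 0
  | d :: rest, i, ff, fo =>
    if d = 1 then i
    else pickBLoop rest (i + 1) (if d = 5 ∧ ff < 0 then i else ff) (if d ≠ -1 ∧ fo < 0 then i else fo)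

def pick_anchor_alt (seed_degs : List Int) : Int :=
  pickBLoop seed_degs 0 (-1) (-1)

-- ===== PRECONDITION & SPEC =====
def Spec_pick_anchor (seed_degs : List Int) (out : Int) : Prop := out = pick_anchor_alt seed_degs
instance (seed_degs : List Int) (out : Int) : Decidable (Spec_pick_anchor seed_degs out) := by unfold Spec_pick_anchor; infer_instance

-- ===== CLAIM (what is proved, stated in full; the proofs are below) =====
def Claim_equal_pick_anchor : Prop := ∀ (seed_degs : List Int), Dom_pick_anchor seed_degs → Spec_pick_anchor seed_degs (pick_anchor seed_degs)

-- ===== LEMMAS AND PROOFS =====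

-- the common characterization: first index of a 1, else first index of a 5, else first index ≠ -1, else 0
def anchorTarget (l : List Int) : Int :=
  match l.findIdx? (· == 1) with
  | some k => (k : Int)
  | none =>
    match l.findIdx? (· == 5) with
    | some k => (k : Int)
    | none =>
      match l.findIdx? (fun d => d != -1) with
      | some k => (k : Int)
      | none => 0

-- ---- B side ----
lemma pickBLoop_spec (t : List Int) (i ff fo : Int) (hi : 0 ≤ i) :
    pickBLoop t i ff fo =
      match t.findIdx? (· == 1) with
      | some k => i + k
      | none =>
        if 0 ≤ ff then ff
        else match t.findIdx? (· == 5) with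
          | some k => i + k
          | none =>
            if 0 ≤ fo then fo
            else match t.findIdx? (fun d => d != -1) with
              | some k => i + k
              | none => 0 := by
  induction t generalizing i ff fo with
  | nil => simp [pickBLoop]
  | cons d r ih =>
    by_cases h1 : d = 1
    · simp [pickBLoop, h1, List.findIdx?_cons]
    · rw [pickBLoop, if_neg h1, ih _ _ _ (by omega)]
      rcases hf1 : r.findIdx? (· == 1) with _ | k1 <;>
        rcases hf5 : r.findIdx? (· == 5) with _ | k5 <;>
          rcases hfo : r.findIdx? (fun d => d != -1) with _ | ko <;>
            by_cases h5 : d = 5 <;> by_cases hm : d = -1 <;>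
              simp [List.findIdx?_cons, h1, h5, hm, hf1, hf5, hfo] <;>
                (try split_ifs) <;> (try omega) <;> ring

lemma alt_eq_target (l : List Int) : pick_anchor_alt l = anchorTarget l := by
  rw [pick_anchor_alt, pickBLoop_spec l 0 (-1) (-1) (by omega), anchorTarget]
  rcases l.findIdx? (· == 1) with _ | k1
  · rcases l.findIdx? (· == 5) with _ | k5
    · rcases l.findIdx? (fun d => d != -1) with _ | ko <;> norm_num
    · norm_num
  · norm_num

-- ---- A side ----
lemma sorted2_eq_sorted_lex (xs : List (Int × Int)) :
    PySem.List.sorted2 xs (·.1) (·.2) = PySem.List.sorted xs (fun x => (toLex x : Lex (Int × Int))) := by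
  have hb : (fun (a b : Int × Int) => decide (a.1 < b.1) || !decide (b.1 < a.1) && decide (a.2 < b.2))
      = fun (a b : Int × Int) => decide ((toLex a : Lex (Int × Int)) < toLex b) := by
    funext a b
    rw [show (decide ((toLex a : Lex (Int × Int)) < toLex b))
        = decide (a.1 < b.1 ∨ a.1 = b.1 ∧ a.2 < b.2) from decide_eq_decide.mpr Prod.Lex.lt_iff]
    by_cases h1 : a.1 < b.1 <;> by_cases h2 : b.1 < a.1 <;> by_cases h3 : a.2 < b.2 <;>
      simp [h1, h2, h3] <;> omega
  simp only [PySem.List.sorted2, PySem.List.sorted, Bool.false_eq_true, if_false]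
  rw [hb]

lemma head?_filter_enumerate (l : List Int) (v : Int) (s : Int) :
    ((PySem.List.enumerate l s).filter (fun q => q.2 == v)).head? =
      (l.findIdx? (· == v)).map (fun k : Nat => ((s + (k : Int)), v)) := by
  induction l generalizing s with
  | nil => simp [PySem.List.enumerate]
  | cons d r ih =>
    rw [PySem.List.enumerate_cons, List.findIdx?_cons]
    by_cases h : d = v
    · simp [h]
    · rw [List.filter_cons, if_neg (by simp [h]), if_neg (by simp [h]), ih]
      rcases r.findIdx? (· == v) with _ | k
      · simp
      · simp only [Option.map_some, Option.map_map, Function.comp]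
        norm_num
        push_cast
        ring

lemma pickAFallback_enumerate (l : List Int) (s : Int) :
    pickAFallback (PySem.List.enumerate l s) =
      match l.findIdx? (fun d => d != -1) with
      | some k => s + k
      | none => 0 := by
  induction l generalizing s with
  | nil => simp [PySem.List.enumerate, pickAFallback]
  | cons d r ih =>
    rw [PySem.List.enumerate_cons, List.findIdx?_cons]
    by_cases h : d = -1
    · rw [pickAFallback, if_neg (by simp [h]), ih, if_neg (by simp [h])]
      rcases r.findIdx? (fun d => d != -1) with _ | k
      · simp
      · simp only [Option.map_some]; push_cast; ring_nf
    · rw [pickAFallback, if_pos (by simp [h]), if_pos (by simp [h])]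
      norm_num

lemma a_eq_target (l : List Int) : pick_anchor l = anchorTarget l := by
  rw [pick_anchor]
  set en := PySem.List.enumerate l with hen
  -- candidates as filter+map
  have hcand : (en.foldl
      (fun acc p => if p.2 = 1 ∨ p.2 = 5 then acc ++ [((if p.2 = 1 then (0 : Int) else 1), p.1)] else acc) []) =
      ((en.filter (fun q => q.2 == 1 || q.2 == 5)).map
        (fun q => ((if q.2 = 1 then (0 : Int) else 1), q.1))) := by
    have := PySem.List.foldl_append_if (fun (q : Int × Int) => q.2 == 1 || q.2 == 5)
      (fun q => ((if q.2 = 1 then (0 : Int) else 1), q.1)) en []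
    rw [List.nil_append] at this
    rw [← this]
    apply List.foldl_ext
    intro acc p _
    by_cases h1 : p.2 = 1 <;> by_cases h5 : p.2 = 5 <;> simp [h1, h5]
  rw [hcand]
  set cand := ((en.filter (fun q => q.2 == 1 || q.2 == 5)).map
    (fun q => ((if q.2 = 1 then (0 : Int) else 1), q.1))) with hc
  -- the sorted candidate list, named explicitly
  set ys := ((en.filter (fun q => q.2 == 1)).map (fun q => ((0 : Int), q.1)))
    ++ ((en.filter (fun q => q.2 == 5)).map (fun q => ((1 : Int), q.1))) with hys
  have hperm : ys.Perm cand := by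
    have h0 : (List.filter (fun q => q.2 == 1) (en.filter (fun q => q.2 == 1 || q.2 == 5)))
        = en.filter (fun q => q.2 == 1) := by
      rw [List.filter_filter]
      apply List.filter_congr
      intro q _
      by_cases h : q.2 = 1
      · rw [h]; decide
      · rw [show (q.2 == 1) = false by simp [h]]; rfl
    have h5 : (List.filter (fun q => !(q.2 == 1)) (en.filter (fun q => q.2 == 1 || q.2 == 5)))
        = en.filter (fun q => q.2 == 5) := by
      rw [List.filter_filter]
      apply List.filter_congr
      intro q _
      by_cases h : q.2 = 1
      · rw [h]; decide
      · rw [show (q.2 == 1) = false by simp [h]]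
        by_cases h' : q.2 = 5
        · rw [h']; decide
        · rw [show (q.2 == 5) = false by simp [h']]; rfl
    have hp := List.filter_append_perm (fun (q : Int × Int) => q.2 == 1)
      (en.filter (fun q => q.2 == 1 || q.2 == 5))
    rw [h0, h5] at hp
    have := hp.map (fun q : Int × Int => ((if q.2 = 1 then (0 : Int) else 1), q.1))
    rw [List.map_append] at this
    rw [hys, hc]
    refine List.Perm.trans ?_ this
    apply List.Perm.append
    · apply List.Perm.of_eq
      apply List.map_congr_left
      intro q hq
      have : q.2 = 1 := by simpa using (List.mem_filter.mp hq).2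
      simp [this]
    · apply List.Perm.of_eq
      apply List.map_congr_left
      intro q hq
      have h5q : q.2 = 5 := by simpa using (List.mem_filter.mp hq).2
      simp [h5q]
  have hpw : ys.Pairwise (fun a b => (toLex a : Lex (Int × Int)) < toLex b) := by
    rw [hys]
    rw [List.pairwise_append]
    have hmono : ∀ (v t : Int), ((en.filter (fun q => q.2 == v)).map (fun q => ((t : Int), q.1))).Pairwise
        (fun a b => (toLex a : Lex (Int × Int)) < toLex b) := by
      intro v t
      apply List.Pairwise.map
        (S := fun a b => (toLex a : Lex (Int × Int)) < toLex b)
        (f := fun q : Int × Int => ((t : Int), q.1))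
      · intro a b hab
        rw [Prod.Lex.lt_iff]
        right; exact ⟨rfl, hab⟩
      · exact ((PySem.List.pairwise_lt_enumerate l 0).filter _)
    refine ⟨hmono 1 0, hmono 5 1, ?_⟩
    intro a ha b hb
    obtain ⟨qa, -, rfl⟩ := List.mem_map.mp ha
    obtain ⟨qb, -, rfl⟩ := List.mem_map.mp hb
    rw [Prod.Lex.lt_iff]
    left; norm_num
  have hsorted : PySem.List.sorted2 cand (·.1) (·.2) = ys := by
    rw [sorted2_eq_sorted_lex]
    exact PySem.List.sorted_eq_of_perm_of_pairwise_lt cand ys _ hperm hpw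
  rcases hf1 : l.findIdx? (· == 1) with _ | k1
  · have hb1 : en.filter (fun q => q.2 == 1) = [] := by
      rw [← List.head?_eq_none_iff]
      rw [hen, head?_filter_enumerate l 1 0, hf1, Option.map_none]
    rcases hf5 : l.findIdx? (· == 5) with _ | k5
    · have hb5 : en.filter (fun q => q.2 == 5) = [] := by
        rw [← List.head?_eq_none_iff]
        rw [hen, head?_filter_enumerate l 5 0, hf5, Option.map_none]
      have hysnil : ys = [] := by rw [hys, hb1, hb5]; simp
      have hcnil : cand = [] := by
        have := hperm.length_eq
        rw [hysnil] at this
        exact List.eq_nil_of_length_eq_zero this.symm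
      rw [if_pos hcnil, hen, pickAFallback_enumerate l 0, anchorTarget, hf1, hf5]
      rcases l.findIdx? (fun d => d != -1) with _ | k
      · rfl
      · norm_num
    · -- no 1, but a 5 at k5
      have hb5 : en.filter (fun q => q.2 == 5) = ((0 + (k5 : Int)), (5 : Int)) ::
          (en.filter (fun q => q.2 == 5)).tail := by
        have h := head?_filter_enumerate l 5 0
        rw [← hen, hf5] at h
        simp only [Option.map_some] at h
        exact List.eq_cons_of_mem_head? h
      have hysc : ys = ((1 : Int), (0 + (k5 : Int))) ::
          ((en.filter (fun q => q.2 == 5)).tail.map (fun q => ((1 : Int), q.1))) := by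
        rw [hys, hb1]
        simp only [List.map_nil, List.nil_append]
        rw [hb5]
        simp
      have hcne : ¬ cand = [] := by
        intro hnil
        have := hperm.length_eq
        rw [hnil, hysc] at this
        simp at this
      rw [if_neg hcne, hsorted, hysc, anchorTarget, hf1, hf5]
      norm_num
  · -- a 1 at k1
    have hb1 : en.filter (fun q => q.2 == 1) = ((0 + (k1 : Int)), (1 : Int)) ::
        (en.filter (fun q => q.2 == 1)).tail := by
      have h := head?_filter_enumerate l 1 0
      rw [← hen, hf1] at h
      simp only [Option.map_some] at h
      exact List.eq_cons_of_mem_head? h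
    have hysc : ys = ((0 : Int), (0 + (k1 : Int))) ::
        (((en.filter (fun q => q.2 == 1)).tail.map (fun q => ((0 : Int), q.1)))
          ++ ((en.filter (fun q => q.2 == 5)).map (fun q => ((1 : Int), q.1)))) := by
      rw [hys, hb1]
      simp
    have hcne : ¬ cand = [] := by
      intro hnil
      have := hperm.length_eq
      rw [hnil, hysc] at this
      simp at this
    rw [if_neg hcne, hsorted, hysc, anchorTarget, hf1]
    norm_num

-- ===== VERDICT (by name: the statement is the Claim_ definition above) =====
theorem pick_anchor_spec : Claim_equal_pick_anchor := by
  intro l _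
  unfold Spec_pick_anchor
  rw [a_eq_target, alt_eq_target]
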